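-- pv_equiv track=rewrite | github.com/etelpmoc/eip4844 | crawler/insert_blobs.py | calculate_actual_size
-- ===== SOURCE A (Python) =====
-- def calculate_actual_size(string):
--     actual_size = 0
--     consecutive_zeros = 0
--     for char in string:
--         if char != '0':
--             actual_size += 1
--             consecutive_zeros = 0
--         else:
--             consecutive_zeros += 1
--             if consecutive_zeros >= 10:
--                 break  # Stop counting if 10 consecutive zeros are encountered
--     return int((actual_size-2)/2)
-- ===== SOURCE B (Python) =====
-- def calculate_actual_size(string):
--     idx = string.find('0' * 10)
--     prefix = string if idx == -1 else string[:idx]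
--     actual_size = len(prefix) - prefix.count('0')
--     return int((actual_size - 2) / 2)
-- ===== Notes on version B (the rewrite author's own statement) =====
-- stated objective: idiomatic
-- what changed: Replaces A's explicit character loop with a consecutive-zero counter by the built-in substring search for ten consecutive zeros plus len/str.count on the prefix before that index.
import Mathlib
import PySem

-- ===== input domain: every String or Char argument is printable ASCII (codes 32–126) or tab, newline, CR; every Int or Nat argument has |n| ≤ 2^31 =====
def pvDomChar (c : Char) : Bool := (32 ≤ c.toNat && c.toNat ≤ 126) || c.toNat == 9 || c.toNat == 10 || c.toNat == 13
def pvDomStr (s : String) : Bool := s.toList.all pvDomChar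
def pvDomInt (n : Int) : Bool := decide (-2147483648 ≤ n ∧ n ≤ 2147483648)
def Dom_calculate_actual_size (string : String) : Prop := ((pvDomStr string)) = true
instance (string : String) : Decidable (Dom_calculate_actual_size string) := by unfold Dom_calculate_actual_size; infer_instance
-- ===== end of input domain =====

-- B replaces A's hand-rolled scan with the built-in substring search and character
-- count (find '0'*10, then len/count on the prefix): more idiomatic, same values.


-- ===== PORT A =====
-- A's for-loop: state (actual_size, consecutive_zeros); 'break' returns the accumulator.
def calcLoopA : List Char → Int → Int → Int
  | [], acc, _ => acc
  | c :: rest, acc, cz =>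
    if c ≠ '0' then calcLoopA rest (acc + 1) 0
    else
      if cz + 1 ≥ 10 then acc
      else calcLoopA rest acc (cz + 1)

def calculate_actual_size (string : String) : Int :=
  let actual_size := calcLoopA string.toList 0 0
  -- int((actual_size-2)/2): PySem.Int.truncdiv (exact here: |actual_size-2| < 2^53)
  PySem.Int.truncdiv (actual_size - 2) 2

-- ===== PORT B =====
def calculate_actual_size_alt (string : String) : Int :=
  let idx := PySem.Str.find string (String.ofList (List.replicate 10 '0'))  -- '0' * 10
  let pre := if idx = -1 then string else PySem.Str.slice string none (some idx)
  let actual_size : Int := PySem.Str.len pre - (PySem.Str.count pre "0" : Int)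
  PySem.Int.truncdiv (actual_size - 2) 2

-- ===== PRECONDITION & SPEC =====
def Spec_calculate_actual_size (string : String) (out : Int) : Prop := out = calculate_actual_size_alt string
instance (string : String) (out : Int) : Decidable (Spec_calculate_actual_size string out) := by unfold Spec_calculate_actual_size; infer_instance

-- ===== CLAIM (what is proved, stated in full; the proofs are below) =====
def Claim_equal_calculate_actual_size : Prop := ∀ (string : String), Dom_calculate_actual_size string → Spec_calculate_actual_size string (calculate_actual_size string)

-- ===== LEMMAS AND PROOFS =====

-- number of non-'0' characters of l, written as len l - count '0' l
def pvNZ (l : List Char) : Int := (l.length : Int) - (l.count '0' : Int)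

-- position where A's loop stops reading (mirrors calcLoopA's control flow)
def pvPos : List Char → Int → Nat
  | [], _ => 0
  | c :: rest, cz =>
    if c ≠ '0' then pvPos rest 0 + 1
    else
      if cz + 1 ≥ 10 then 0
      else pvPos rest (cz + 1) + 1

-- B's cut position: first index of ten consecutive zeros, else the length
def pvPosB (l : List Char) : Nat :=
  if PySem.Chars.find l (List.replicate 10 '0') = -1 then l.length
  else (PySem.Chars.find l (List.replicate 10 '0')).toNat

lemma pvNZ_cons_ne {c : Char} (l : List Char) (h : c ≠ '0') :
    pvNZ (c :: l) = pvNZ l + 1 := by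
  simp [pvNZ, h]
  ring

lemma pvNZ_cons_zero (l : List Char) : pvNZ ('0' :: l) = pvNZ l := by
  simp [pvNZ]

lemma calcLoopA_eq (l : List Char) : ∀ (acc cz : Int),
    calcLoopA l acc cz = acc + pvNZ (l.take (pvPos l cz)) := by
  induction l with
  | nil => intro acc cz; simp [calcLoopA, pvPos, pvNZ]
  | cons c t ih =>
    intro acc cz
    by_cases hc : c = '0'
    · subst hc
      by_cases h10 : cz + 1 ≥ 10
      · simp [calcLoopA, pvPos, h10, pvNZ]
      · simp only [calcLoopA, pvPos, if_neg (by simp : ¬ ('0' ≠ '0')), if_neg h10,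
          List.take_succ_cons, pvNZ_cons_zero]
        exact ih acc (cz + 1)
    · simp only [calcLoopA, pvPos, if_pos hc, List.take_succ_cons, pvNZ_cons_ne _ hc]
      rw [ih (acc + 1) 0]
      ring

-- `find` returns the first index at which `sub` occurs as a prefix of a tail
lemma pvFind_first {l sub : List Char} {k : Nat} (hp : sub <+: l.drop k)
    (hmin : ∀ i, i < k → ¬ sub <+: l.drop i) :
    PySem.Chars.find l sub = (k : Int) := by
  have hinf : sub <:+: l := hp.isInfix.trans (List.drop_suffix k l).isInfix
  have h0 : 0 ≤ PySem.Chars.find l sub := (PySem.Chars.find_nonneg_iff l sub).mpr hinf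
  obtain ⟨h1, h2⟩ := PySem.Chars.find_spec h0
  have hle : (PySem.Chars.find l sub).toNat ≤ k := by
    by_contra hgt
    exact h2 k (by omega) hp
  have hge : k ≤ (PySem.Chars.find l sub).toNat := by
    by_contra hgt
    exact hmin _ (by omega) h1
  omega

lemma pvPosB_prefix {l : List Char} (h : List.replicate 10 '0' <+: l) : pvPosB l = 0 := by
  have hf : PySem.Chars.find l (List.replicate 10 '0') = ((0 : Nat) : Int) :=
    pvFind_first (by simpa using h) (by intro i hi; exact absurd hi (Nat.not_lt_zero i))
  unfold pvPosB
  rw [hf]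
  norm_num

lemma pvPosB_cons {c : Char} {t : List Char}
    (h : ¬ (List.replicate 10 '0' <+: (c :: t))) : pvPosB (c :: t) = pvPosB t + 1 := by
  by_cases hin : List.replicate 10 '0' <:+: t
  · -- occurrence in t at index j ⇒ first occurrence in c::t is at j+1
    have h0 : 0 ≤ PySem.Chars.find t (List.replicate 10 '0') :=
      (PySem.Chars.find_nonneg_iff t _).mpr hin
    obtain ⟨h1, h2⟩ := PySem.Chars.find_spec h0
    set j := (PySem.Chars.find t (List.replicate 10 '0')).toNat with hj
    have hft : PySem.Chars.find t (List.replicate 10 '0') = (j : Int) :=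
      (Int.toNat_of_nonneg h0).symm
    have hf : PySem.Chars.find (c :: t) (List.replicate 10 '0') = ((j + 1 : Nat) : Int) := by
      refine pvFind_first ?_ ?_
      · simpa using h1
      · intro i hi
        match i with
        | 0 => simpa using h
        | i + 1 => simpa using h2 i (by omega)
    unfold pvPosB
    rw [hf, hft]
    have hne1 : ((j + 1 : Nat) : Int) ≠ -1 := by omega
    have hne2 : ((j : Nat) : Int) ≠ -1 := by omega
    rw [if_neg hne1, if_neg hne2]
    omega
  · -- no occurrence in t, hence (not a prefix either) none in c::t
    have hnin : ¬ List.replicate 10 '0' <:+: (c :: t) := by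
      intro hcon
      rcases List.infix_cons_iff.mp hcon with hpre | hsuf
      · exact h hpre
      · exact hin hsuf
    have hf1 : PySem.Chars.find (c :: t) (List.replicate 10 '0') = -1 :=
      (PySem.Chars.find_eq_neg_one_iff _ _).mpr hnin
    have hf2 : PySem.Chars.find t (List.replicate 10 '0') = -1 :=
      (PySem.Chars.find_eq_neg_one_iff _ _).mpr hin
    unfold pvPosB
    rw [hf1, hf2, if_pos rfl, if_pos rfl]
    simp

lemma pvRep_mono {m k : Nat} (h : m ≤ k) :
    List.replicate m '0' <+: List.replicate k '0' :=
  ⟨List.replicate (k - m) '0', by rw [← List.replicate_add]; congr 1; omega⟩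

lemma pvMain (l : List Char) : ∀ (k : Nat), k < 10 →
    pvNZ (l.take (pvPos l (k : Int))) =
      if List.replicate (10 - k) '0' <+: l then 0 else pvNZ (l.take (pvPosB l)) := by
  induction l with
  | nil =>
    intro k hk
    have hnp : ¬ List.replicate (10 - k) '0' <+: ([] : List Char) := by
      intro hp
      have := hp.length_le
      simp at this
      omega
    simp [pvPos, pvNZ, hnp]
  | cons c t ih =>
    intro k hk
    by_cases hc : c = '0'
    · subst hc
      by_cases h9 : k = 9
      · subst h9
        simp [pvPos, pvNZ]
      · have hstep : pvPos ('0' :: t) (k : Int) = pvPos t ((k : Int) + 1) + 1 := by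
          simp [pvPos]
          omega
        have hcast : ((k : Int) + 1) = (((k + 1 : Nat)) : Int) := by push_cast; ring
        have hrep : List.replicate (10 - k) '0' <+: ('0' :: t) ↔
            List.replicate (10 - (k + 1)) '0' <+: t := by
          have h10k : 10 - k = (10 - (k + 1)) + 1 := by omega
          rw [h10k, List.replicate_succ, List.cons_prefix_cons]
          simp
        rw [hstep, List.take_succ_cons, pvNZ_cons_zero, hcast, ih (k + 1) (by omega)]
        by_cases hr : List.replicate (10 - (k + 1)) '0' <+: t
        · rw [if_pos hr, if_pos (hrep.mpr hr)]
        · have hnot : ¬ List.replicate 10 '0' <+: ('0' :: t) := by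
            intro hcon
            rw [List.replicate_succ, List.cons_prefix_cons] at hcon
            exact hr ((pvRep_mono (by omega)).trans hcon.2)
          rw [if_neg hr, if_neg (fun hcon => hr (hrep.mp hcon)),
            pvPosB_cons hnot, List.take_succ_cons, pvNZ_cons_zero]
    · have hstep : pvPos (c :: t) (k : Int) = pvPos t 0 + 1 := by
        simp [pvPos, hc]
      have ih0 := ih 0 (by omega)
      simp only [Nat.cast_zero, Nat.sub_zero] at ih0
      have hnot10 : ¬ List.replicate 10 '0' <+: (c :: t) := by
        intro hcon
        rw [List.replicate_succ, List.cons_prefix_cons] at hcon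
        exact hc hcon.1.symm
      have hnotk : ¬ List.replicate (10 - k) '0' <+: (c :: t) := by
        intro hcon
        have h10k : 10 - k = (10 - (k + 1)) + 1 := by omega
        rw [h10k, List.replicate_succ, List.cons_prefix_cons] at hcon
        exact hc hcon.1.symm
      rw [hstep, List.take_succ_cons, pvNZ_cons_ne _ hc, ih0,
        if_neg hnotk, pvPosB_cons hnot10, List.take_succ_cons, pvNZ_cons_ne _ hc]
      by_cases hr : List.replicate 10 '0' <+: t
      · rw [if_pos hr, pvPosB_prefix hr]
        simp [pvNZ]
      · rw [if_neg hr]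

-- counting the single character '0' with Python's str.count
lemma pvCount_go_zero : ∀ (l : List Char) (fuel acc : Nat), l.length ≤ fuel →
    PySem.Chars.count.go ['0'] fuel l acc = acc + l.count '0' := by
  intro l
  induction l with
  | nil => intro fuel acc _; cases fuel <;> simp [PySem.Chars.count.go]
  | cons c t ih =>
    intro fuel acc hlen
    match fuel with
    | fuel + 1 =>
      have hlen' : t.length ≤ fuel := by simp at hlen; omega
      by_cases hc : c = '0'
      · subst hc
        have hpre : List.isPrefixOf ['0'] ('0' :: t) = true := by
          simp [List.isPrefixOf]
        simp only [PySem.Chars.count.go, hpre, if_true, List.length_singleton,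
          List.drop_succ_cons, List.drop_zero]
        rw [ih fuel (acc + 1) hlen']
        simp
        omega
      · have hpre : List.isPrefixOf ['0'] (c :: t) = false := by
          simp [List.isPrefixOf]
          exact fun hcon => hc hcon.symm
        simp only [PySem.Chars.count.go, hpre, Bool.false_eq_true, if_false]
        rw [ih fuel acc hlen']
        simp [List.count_cons]
        exact hc

lemma pvCount_zero (l : List Char) : PySem.Chars.count l ['0'] = l.count '0' := by
  have h1 : PySem.Chars.count l ['0'] = PySem.Chars.count.go ['0'] l.length l 0 := by
    simp [PySem.Chars.count]
  rw [h1, pvCount_go_zero l l.length 0 le_rfl]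
  omega

-- B computes truncdiv (pvNZ (take (pvPosB l) l) - 2) 2
lemma pvAlt_eq (s : String) :
    calculate_actual_size_alt s =
      PySem.Int.truncdiv (pvNZ (s.toList.take (pvPosB s.toList)) - 2) 2 := by
  simp only [calculate_actual_size_alt, PySem.Str.find_eq]
  rw [show (String.ofList (List.replicate 10 '0')).toList = List.replicate 10 '0' from by simp]
  by_cases hneg : PySem.Chars.find s.toList (List.replicate 10 '0') = -1
  · rw [if_pos hneg]
    have hB : pvPosB s.toList = s.toList.length := by unfold pvPosB; rw [if_pos hneg]
    have hcount : PySem.Str.count s "0" = s.toList.count '0' := by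
      rw [PySem.Str.count_eq]
      exact pvCount_zero _
    rw [hB, List.take_length, PySem.Str.len_eq, hcount]
    rfl
  · rw [if_neg hneg]
    have h0 : 0 ≤ PySem.Chars.find s.toList (List.replicate 10 '0') := by
      have := PySem.Chars.neg_one_le_find s.toList (List.replicate 10 '0')
      omega
    have hB : pvPosB s.toList = (PySem.Chars.find s.toList (List.replicate 10 '0')).toNat := by
      unfold pvPosB
      rw [if_neg hneg]
    have htl : (PySem.Str.slice s none (some (PySem.Chars.find s.toList (List.replicate 10 '0')))).toList =
        s.toList.take (PySem.Chars.find s.toList (List.replicate 10 '0')).toNat := by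
      rw [PySem.Str.toList_slice, PySem.Chars.slice_eq_listSlice, PySem.List.slice_to _ h0]
    have hcount : PySem.Str.count (PySem.Str.slice s none (some (PySem.Chars.find s.toList (List.replicate 10 '0')))) "0" =
        (s.toList.take (PySem.Chars.find s.toList (List.replicate 10 '0')).toNat).count '0' := by
      rw [PySem.Str.count_eq, htl]
      exact pvCount_zero _
    rw [PySem.Str.len_eq, htl, hcount, hB]
    rfl

lemma pvA_eq (s : String) :
    calculate_actual_size s =
      PySem.Int.truncdiv (pvNZ (s.toList.take (pvPosB s.toList)) - 2) 2 := by
  simp only [calculate_actual_size]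
  rw [calcLoopA_eq s.toList 0 0]
  have h := pvMain s.toList 0 (by omega)
  simp only [Nat.cast_zero, Nat.sub_zero] at h
  rw [zero_add, h]
  by_cases hr : List.replicate 10 '0' <+: s.toList
  · rw [if_pos hr, pvPosB_prefix hr]
    simp [pvNZ]
  · rw [if_neg hr]

-- ===== VERDICT (by name: the statement is the Claim_ definition above) =====
theorem calculate_actual_size_spec : Claim_equal_calculate_actual_size := by
  intro s _
  unfold Spec_calculate_actual_size
  rw [pvA_eq, pvAlt_eq]
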